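-- pv_equiv track=rewrite | github.com/ms1963/CollatzLibrary | src/CollatzLibrary.py | reach_eh
-- ===== SOURCE A (Python) =====
-- def even(n):
--     return n % 2 == 0
--
-- def reach_eh(n, base = 3, delta = 1):
--     if (even(base) != even(delta)):
--         raise ValueError("base and delta must be both evil or odd")
--     e = n
--     cseq = {n} # init collatz sequence
--     completed = False
--     while not completed:
--         if even(e):
--             e = e // 2
--         else:
--             e = base * e + delta
--         if not e in cseq:
--             cseq.add(e)
--         else:
--             completed = True
--     return len(cseq), e
-- ===== SOURCE B (Python) =====
-- def reach_eh(n, base = 3, delta = 1):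
--     # Pointer-free cycle detection: no visited set. For k = 1, 2, ... test the
--     # k-th iterate e = x_k against the prefix x_0..x_{k-1} by recomputing that
--     # prefix from n; the first hit gives the answer (k, e). O(1) memory.
--     if (base - delta) % 2 != 0:
--         raise ValueError("base and delta must be both evil or odd")
--     def step(x):
--         return x // 2 if x % 2 == 0 else base * x + delta
--     k, e = 1, step(n)
--     while True:
--         y = n
--         for _ in range(k):
--             if y == e:
--                 return k, e
--             y = step(y)
--         k, e = k + 1, step(e)
-- ===== Notes on version B (the rewrite author's own statement) =====
-- stated objective: alternative
-- what changed: B removes the visited-set entirely: a pointer-free nested-loop cycle detection that, for k = 1, 2, ..., recomputes the prefix iterates x_0..x_{k-1} from n and compares each against the k-th iterate, returning (k, x_k) at the first hit - O(1) memory and two plain integer loops instead of A's flag-driven single pass over a growing set with a final len().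
import Mathlib
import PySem

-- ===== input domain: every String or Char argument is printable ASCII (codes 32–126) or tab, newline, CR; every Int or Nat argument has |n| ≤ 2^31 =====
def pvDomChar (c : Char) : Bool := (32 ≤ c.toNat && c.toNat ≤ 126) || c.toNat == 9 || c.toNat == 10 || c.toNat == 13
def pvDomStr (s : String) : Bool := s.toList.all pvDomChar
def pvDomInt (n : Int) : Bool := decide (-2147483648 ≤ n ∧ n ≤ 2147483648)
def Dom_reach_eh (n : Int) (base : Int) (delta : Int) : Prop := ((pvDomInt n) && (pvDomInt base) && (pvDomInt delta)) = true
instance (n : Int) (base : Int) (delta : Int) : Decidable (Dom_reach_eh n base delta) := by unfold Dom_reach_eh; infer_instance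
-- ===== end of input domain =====

-- B replaces A's visited-set cycle detection by a pointer-free nested-loop search: for
-- k = 1, 2, … it tests the k-th iterate against the recomputed prefix x_0..x_{k-1},
-- using O(1) memory instead of a growing set (objective: alternative — trades time for
-- memory). Both Python loops may not terminate (the repeat may never occur); the ports
-- model one detection round per unit of the fuel pvFuel, returning (0, 0) if no repeat
-- is found within pvFuel rounds — on inputs whose trajectory repeats within pvFuel
-- steps each port computes exactly what its Python returns.

def pvFuel : Nat := 2 ^ 64

-- ===== PORT A =====
-- even(n) helper of A
def pvEven (m : Int) : Bool := PySem.Int.mod m 2 == 0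

-- A's while-loop: state (e, cseq); each iteration steps e, then checks membership (completed flag).
def reachLoopA (base : Int) (delta : Int) : Nat → Int → PySem.Set Int → Int × Int
  | 0, _, _ => (0, 0)
  | fuel + 1, e, cseq =>
    let e' := if pvEven e then PySem.Int.floordiv e 2 else base * e + delta
    if PySem.Set.contains cseq e' then ((PySem.Set.len cseq : Int), e')
    else reachLoopA base delta fuel e' (PySem.Set.add cseq e')

def reach_eh (n : Int) (base : Int) (delta : Int) : Int × Int :=
  if pvEven base != pvEven delta then (0, 0)  -- Python raises ValueError here (outside Pre_)
  else reachLoopA base delta pvFuel n (PySem.Set.ofList [n])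

-- ===== PORT B =====
-- B's local helper step(x)
def pvStep (base delta x : Int) : Int :=
  if PySem.Int.mod x 2 == 0 then PySem.Int.floordiv x 2 else base * x + delta

-- B's inner for-loop: does the prefix x_0..x_{k-1} (recomputed from y) contain e?
def scanB (base delta e : Int) : Nat → Int → Bool
  | 0, _ => false
  | k + 1, y => if y == e then true else scanB base delta e k (pvStep base delta y)

-- B's outer while-loop: state (k, e = x_k); one detection round per unit of fuel.
def outerB (base delta n : Int) : Nat → Nat → Int → Int × Int
  | 0, _, _ => (0, 0)
  | fuel + 1, k, e =>
    if scanB base delta e k n then ((k : Int), e)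
    else outerB base delta n fuel (k + 1) (pvStep base delta e)

def reach_eh_alt (n : Int) (base : Int) (delta : Int) : Int × Int :=
  if PySem.Int.mod (base - delta) 2 != 0 then (0, 0)  -- Python raises ValueError here (outside Pre_)
  else outerB base delta n pvFuel 1 (pvStep base delta n)

-- ===== PRECONDITION & SPEC =====
-- Pre_ excludes exactly the inputs on which A raises ValueError (base and delta of different parity).
def Pre_reach_eh (n : Int) (base : Int) (delta : Int) : Prop :=
  PySem.Int.mod base 2 = PySem.Int.mod delta 2
instance (n : Int) (base : Int) (delta : Int) : Decidable (Pre_reach_eh n base delta) := by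
  unfold Pre_reach_eh; infer_instance

def pvWitness_reach_eh : Int × Int × Int := (0, 3, 1)

def Spec_reach_eh (n : Int) (base : Int) (delta : Int) (out : Int × Int) : Prop := out = reach_eh_alt n base delta
instance (n : Int) (base : Int) (delta : Int) (out : Int × Int) : Decidable (Spec_reach_eh n base delta out) := by unfold Spec_reach_eh; infer_instance

-- ===== CLAIM (what is proved, stated in full; the proofs are below) =====
def Claim_equal_reach_eh : Prop := ∀ (n : Int) (base : Int) (delta : Int), Dom_reach_eh n base delta → Pre_reach_eh n base delta → Spec_reach_eh n base delta (reach_eh n base delta)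

-- ===== LEMMAS AND PROOFS =====

lemma loopA_succ (base delta : Int) (fuel : Nat) (e : Int) (cseq : PySem.Set Int) :
    reachLoopA base delta (fuel + 1) e cseq =
      if PySem.Set.contains cseq (pvStep base delta e) then
        ((PySem.Set.len cseq : Int), pvStep base delta e)
      else reachLoopA base delta fuel (pvStep base delta e) (PySem.Set.add cseq (pvStep base delta e)) := rfl

-- B's inner scan decides membership of e in the first k iterates of the step map from y.
lemma scanB_iff (base delta e : Int) :
    ∀ (k : Nat) (y : Int),
      scanB base delta e k y = true ↔ ∃ j < k, (pvStep base delta)^[j] y = e := by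
  intro k
  induction k with
  | zero => intro y; simp [scanB]
  | succ k ih =>
    intro y
    simp only [scanB]
    by_cases hy : y = e
    · subst hy; simp
      exact ⟨0, by omega, rfl⟩
    · have : (y == e) = false := by simp [hy]
      rw [this]
      simp only [Bool.false_eq_true, if_false, ih]
      constructor
      · rintro ⟨j, hj, hje⟩
        exact ⟨j + 1, by omega, by rwa [Function.iterate_succ_apply]⟩
      · rintro ⟨j, hj, hje⟩
        cases j with
        | zero => exact absurd hje hy
        | succ j => exact ⟨j, by omega, by rwa [Function.iterate_succ_apply] at hje⟩

-- The two loops in lockstep: round k of A (about to step from e = x_{k-1}, with cseq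
-- holding exactly {x_0..x_{k-1}}, of size k) matches round k of B (about to test x_k).
lemma reachLoop_eq (base delta n : Int) :
    ∀ (fuel k : Nat) (e : Int) (cseq : PySem.Set Int),
      (∀ x, PySem.Set.contains cseq x = true ↔ ∃ j < k, (pvStep base delta)^[j] n = x) →
      PySem.Set.len cseq = k →
      pvStep base delta e = (pvStep base delta)^[k] n →
      reachLoopA base delta fuel e cseq =
        outerB base delta n fuel k (pvStep base delta e) := by
  intro fuel
  induction fuel with
  | zero => intro k e cseq _ _ _; rfl
  | succ fuel ih =>
    intro k e cseq hmem hlen hstep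
    rw [loopA_succ]
    show _ = outerB base delta n (fuel + 1) k (pvStep base delta e)
    rw [outerB]
    have hcs : PySem.Set.contains cseq (pvStep base delta e) = scanB base delta (pvStep base delta e) k n := by
      rw [Bool.eq_iff_iff, hmem, scanB_iff]
    cases hc : scanB base delta (pvStep base delta e) k n with
    | true =>
      rw [hcs, hc]
      simp only [if_true, hlen]
    | false =>
      rw [hcs, hc]
      simp only [Bool.false_eq_true, if_false]
      have hnot : pvStep base delta e ∉ cseq := by
        intro h
        have hcon := (PySem.Set.contains_iff cseq (pvStep base delta e)).mpr h
        rw [hcs, hc] at hcon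
        exact Bool.false_ne_true hcon
      apply ih
      · intro x
        rw [PySem.Set.add_of_not_mem hnot]
        simp only [PySem.Set.contains_eq_listContains] at hmem ⊢
        simp only [List.contains_append, List.contains_cons, List.contains_nil, Bool.or_eq_true,
          Bool.false_eq_true, or_false, beq_iff_eq] at *
        constructor
        · rintro (hx | hx)
          · obtain ⟨j, hj, hje⟩ := (hmem x).mp hx
            exact ⟨j, by omega, hje⟩
          · exact ⟨k, by omega, by rw [← hstep, hx]⟩
        · rintro ⟨j, hj, hje⟩
          by_cases hjk : j < k
          · exact Or.inl ((hmem x).mpr ⟨j, hjk, hje⟩)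
          · have : j = k := by omega
            subst this
            exact Or.inr (by rw [← hje, hstep])
      · rw [PySem.Set.add_of_not_mem hnot]
        simp only [PySem.Set.len, List.length_append, List.length_singleton] at hlen ⊢
        omega
      · rw [Function.iterate_succ_apply', ← hstep]

-- ===== VERDICT (by name: the statement is the Claim_ definition above) =====
theorem reach_eh_spec : Claim_equal_reach_eh := by
  intro n base delta _ hpre
  unfold Spec_reach_eh reach_eh reach_eh_alt
  unfold Pre_reach_eh at hpre
  have h2 : (0:Int) < 2 := by norm_num
  have hpre' : base % 2 = delta % 2 := by
    rwa [PySem.Int.mod_eq_emod_of_pos h2, PySem.Int.mod_eq_emod_of_pos h2] at hpre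
  have hg : PySem.Int.mod (base - delta) 2 = 0 := by
    rw [PySem.Int.mod_eq_emod_of_pos h2]
    omega
  simp only [pvEven, hpre, hg, bne_self_eq_false, Bool.false_eq_true, if_false]
  apply reachLoop_eq
  · intro x
    have h1 : PySem.Set.ofList [n] = [n] := rfl
    rw [h1]
    simp only [PySem.Set.contains_eq_listContains, List.contains_cons, List.contains_nil,
      Bool.or_eq_true, Bool.false_eq_true, or_false, beq_iff_eq]
    constructor
    · intro hx; exact ⟨0, by omega, hx.symm⟩
    · rintro ⟨j, hj, hje⟩
      have : j = 0 := by omega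
      subst this
      exact hje.symm
  · rfl
  · rw [Function.iterate_one]
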